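-- pv_equiv track=rewrite | github.com/pypi-data/pypi-mirror-400 | packages/gitlab-mr-mcp/gitlab_mr_mcp-1.0.0-py3-none-any.whl/gitlab_mr_mcp/tools/update_merge_request.py | apply_draft_to_title
-- ===== SOURCE A (Python) =====
-- def apply_draft_to_title(title, draft):
--     """Apply or remove Draft: prefix based on draft flag."""
--     # Remove existing draft/wip prefixes first (case-insensitive)
--     clean_title = title
--     for prefix in ["Draft: ", "Draft:", "WIP: ", "WIP:", "draft: ", "draft:", "wip: ", "wip:"]:
--         if clean_title.startswith(prefix):
--             clean_title = clean_title[len(prefix) :].lstrip()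
--             break
--
--     if draft:
--         return f"Draft: {clean_title}"
--     return clean_title
-- ===== SOURCE B (Python) =====
-- import re
--
-- _PREFIX_RE = re.compile(r'^(Draft|WIP|draft|wip):')
--
-- def apply_draft_to_title(title, draft):
--     """Apply or remove Draft: prefix based on draft flag."""
--     m = _PREFIX_RE.match(title)
--     clean_title = title[m.end():].lstrip() if m else title
--     return f"Draft: {clean_title}" if draft else clean_title
-- ===== Notes on version B (the rewrite author's own statement) =====
-- stated objective: idiomatic
-- what changed: Replaces the explicit 8-prefix loop-with-break by a single anchored regex match on the four case-sensitive keywords followed by ':', slicing at the match end and lstripping (the loop's ':'/': ' pairs collapse because lstrip absorbs the space).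
import Mathlib
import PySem

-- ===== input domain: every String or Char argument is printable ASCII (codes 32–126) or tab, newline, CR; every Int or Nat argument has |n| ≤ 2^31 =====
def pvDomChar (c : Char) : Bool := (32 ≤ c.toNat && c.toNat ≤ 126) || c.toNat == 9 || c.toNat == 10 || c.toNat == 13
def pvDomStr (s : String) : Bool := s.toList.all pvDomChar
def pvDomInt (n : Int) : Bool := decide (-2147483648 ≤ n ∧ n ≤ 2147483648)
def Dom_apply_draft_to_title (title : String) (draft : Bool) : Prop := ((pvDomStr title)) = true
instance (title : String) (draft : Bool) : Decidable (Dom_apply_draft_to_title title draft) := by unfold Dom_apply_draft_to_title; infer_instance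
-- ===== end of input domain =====

-- B replaces A's 8-prefix loop-with-break by one anchored regex match on the four keywords
-- followed by ':' plus an lstrip (idiomatic; same return value everywhere).

-- ===== PORT A =====
-- the for-loop with break over the prefix list
def pvStripLoop : String → List String → String
  | t, [] => t
  | t, p :: ps =>
    if PySem.Str.startswith t p then
      PySem.Str.lstrip (PySem.Str.slice t (some (PySem.Str.len p)) none)
    else pvStripLoop t ps

def apply_draft_to_title (title : String) (draft : Bool) : String :=
  let clean_title := pvStripLoop title
    ["Draft: ", "Draft:", "WIP: ", "WIP:", "draft: ", "draft:", "wip: ", "wip:"]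
  if draft then "Draft: " ++ clean_title else clean_title

-- ===== PORT B =====
-- hand-port of re.match(r'^(Draft|WIP|draft|wip):', title): the regex engine tries the
-- alternatives left to right at position 0; returns the match end (exact for this pattern)
def pvMatchEnd? (t : String) : Option Int :=
  (["Draft:", "WIP:", "draft:", "wip:"]).findSome?
    (fun p => if PySem.Str.startswith t p then some (PySem.Str.len p) else none)

def apply_draft_to_title_alt (title : String) (draft : Bool) : String :=
  let clean_title :=
    match pvMatchEnd? title with
    | some e => PySem.Str.lstrip (PySem.Str.slice title (some e) none)
    | none => title
  if draft then "Draft: " ++ clean_title else clean_title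

-- ===== PRECONDITION & SPEC =====
def Spec_apply_draft_to_title (title : String) (draft : Bool) (out : String) : Prop := out = apply_draft_to_title_alt title draft
instance (title : String) (draft : Bool) (out : String) : Decidable (Spec_apply_draft_to_title title draft out) := by unfold Spec_apply_draft_to_title; infer_instance

-- ===== CLAIM (what is proved, stated in full; the proofs are below) =====
def Claim_equal_apply_draft_to_title : Prop := ∀ (title : String) (draft : Bool), Dom_apply_draft_to_title title draft → Spec_apply_draft_to_title title draft (apply_draft_to_title title draft)

-- ===== LEMMAS AND PROOFS =====

-- startswith "p + space" implies startswith p (char level)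
theorem pvSwSpaceC {s p : List Char} (h : PySem.Chars.startswith s (p ++ [' ']) = true) :
    PySem.Chars.startswith s p = true := by
  simp only [PySem.Chars.startswith_iff] at h ⊢
  refine List.IsPrefix.trans ?_ h
  simp

-- stripping "p + space" then lstrip equals stripping "p" then lstrip
theorem pvPairEqN {t : String} {p : List Char}
    (h : PySem.Chars.startswith t.toList (p ++ [' ']) = true) :
    PySem.Str.lstrip (PySem.Str.slice t (some ((p.length + 1 : Nat) : Int)) none)
      = PySem.Str.lstrip (PySem.Str.slice t (some ((p.length : Nat) : Int)) none) := by
  apply String.toList_inj.mp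
  simp only [PySem.Chars.startswith_iff] at h
  obtain ⟨r, hr⟩ := h
  simp only [PySem.Str.toList_lstrip, PySem.Str.toList_slice, PySem.Chars.slice_eq_listSlice]
  rw [PySem.List.slice_from_natCast, PySem.List.slice_from_natCast, ← hr]
  have d1 : ((p ++ [' ']) ++ r).drop (p.length + 1) = r :=
    List.drop_left' (by simp)
  have d2 : ((p ++ [' ']) ++ r).drop p.length = ' ' :: r := by
    rw [List.append_assoc]
    exact List.drop_left' rfl
  rw [d1, d2]
  simp [PySem.Chars.lstrip, List.dropWhile,
    show PySem.Chars.isspace ' ' = true from by decide]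

-- the loop over the eight prefixes computes B's match-and-strip
theorem pvCleanEq (t : String) :
    pvStripLoop t ["Draft: ", "Draft:", "WIP: ", "WIP:", "draft: ", "draft:", "wip: ", "wip:"]
      = (match pvMatchEnd? t with
         | some e => PySem.Str.lstrip (PySem.Str.slice t (some e) none)
         | none => t) := by
  simp only [pvStripLoop, pvMatchEnd?, List.findSome?]
  by_cases h1 : PySem.Chars.startswith t.toList ['D','r','a','f','t',':'] = true
  · by_cases h1s : PySem.Chars.startswith t.toList ['D','r','a','f','t',':',' '] = true
    · have hp := pvPairEqN (p := ['D','r','a','f','t',':']) (by simpa using h1s)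
      simp only [List.length] at hp
      simp [h1, h1s]
      simpa using hp
    · simp [h1, h1s]
  · have h1s : PySem.Chars.startswith t.toList ['D','r','a','f','t',':',' '] = false := by
      by_contra hc
      exact h1 (pvSwSpaceC (p := ['D','r','a','f','t',':']) (by simpa using Bool.of_not_eq_false hc))
    by_cases h2 : PySem.Chars.startswith t.toList ['W','I','P',':'] = true
    · by_cases h2s : PySem.Chars.startswith t.toList ['W','I','P',':',' '] = true
      · have hp := pvPairEqN (p := ['W','I','P',':']) (by simpa using h2s)
        simp only [List.length] at hp
        simp [h1, h1s, h2, h2s]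
        simpa using hp
      · simp [h1, h1s, h2, h2s]
    · have h2s : PySem.Chars.startswith t.toList ['W','I','P',':',' '] = false := by
        by_contra hc
        exact h2 (pvSwSpaceC (p := ['W','I','P',':']) (by simpa using Bool.of_not_eq_false hc))
      by_cases h3 : PySem.Chars.startswith t.toList ['d','r','a','f','t',':'] = true
      · by_cases h3s : PySem.Chars.startswith t.toList ['d','r','a','f','t',':',' '] = true
        · have hp := pvPairEqN (p := ['d','r','a','f','t',':']) (by simpa using h3s)
          simp only [List.length] at hp
          simp [h1, h1s, h2, h2s, h3, h3s]
          simpa using hp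
        · simp [h1, h1s, h2, h2s, h3, h3s]
      · have h3s : PySem.Chars.startswith t.toList ['d','r','a','f','t',':',' '] = false := by
          by_contra hc
          exact h3 (pvSwSpaceC (p := ['d','r','a','f','t',':']) (by simpa using Bool.of_not_eq_false hc))
        by_cases h4 : PySem.Chars.startswith t.toList ['w','i','p',':'] = true
        · by_cases h4s : PySem.Chars.startswith t.toList ['w','i','p',':',' '] = true
          · have hp := pvPairEqN (p := ['w','i','p',':']) (by simpa using h4s)
            simp only [List.length] at hp
            simp [h1, h1s, h2, h2s, h3, h3s, h4, h4s]
            simpa using hp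
          · simp [h1, h1s, h2, h2s, h3, h3s, h4, h4s]
        · have h4s : PySem.Chars.startswith t.toList ['w','i','p',':',' '] = false := by
            by_contra hc
            exact h4 (pvSwSpaceC (p := ['w','i','p',':']) (by simpa using Bool.of_not_eq_false hc))
          simp [h1, h1s, h2, h2s, h3, h3s, h4, h4s]

-- ===== VERDICT (by name: the statement is the Claim_ definition above) =====
theorem apply_draft_to_title_spec : Claim_equal_apply_draft_to_title := by
  intro title draft _
  unfold Spec_apply_draft_to_title apply_draft_to_title apply_draft_to_title_alt
  rw [pvCleanEq title]
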